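-- pv_equiv track=rewrite | github.com/vio-vv/Navigation | src/test/poisson_preview.py | infer_level
-- ===== SOURCE A (Python) =====
-- def infer_level(address: tuple[int, ...]) -> int:
--     if not address:
--         return 0
--     self_id = address[0]
--     level = 0
--     for idx, parent_id in enumerate(address[1:], start=1):
--         if parent_id == self_id:
--             level = idx
--     return level
-- ===== SOURCE B (Python) =====
-- def infer_level(address: tuple[int, ...]) -> int:
--     if not address:
--         return 0
--     for idx in range(len(address) - 1, 0, -1):
--         if address[idx] == address[0]:
--             return idx
--     return 0
-- ===== Notes on version B (the rewrite author's own statement) =====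
-- stated objective: alternative
-- what changed: Replaces A's forward scan that keeps overwriting the last matching index with a backward scan from the end that returns the first match immediately.
import Mathlib
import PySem

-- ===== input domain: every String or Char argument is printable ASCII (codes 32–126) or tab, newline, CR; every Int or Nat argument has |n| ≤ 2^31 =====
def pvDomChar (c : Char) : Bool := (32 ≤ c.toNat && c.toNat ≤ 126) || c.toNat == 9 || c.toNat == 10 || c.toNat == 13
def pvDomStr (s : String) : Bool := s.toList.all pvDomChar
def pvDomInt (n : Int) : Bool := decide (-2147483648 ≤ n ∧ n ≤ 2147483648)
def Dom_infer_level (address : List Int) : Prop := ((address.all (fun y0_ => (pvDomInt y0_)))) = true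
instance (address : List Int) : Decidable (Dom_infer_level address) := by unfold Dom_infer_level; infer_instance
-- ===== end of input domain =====

-- B replaces A's forward scan (keep overwriting the last matching index) by a
-- backward scan from the end that returns the first match; objective: alternative.

-- ===== PORT A =====
-- forward scan: for idx, parent_id in enumerate(address[1:], 1): if parent_id == self_id: level = idx
def infer_level (address : List Int) : Int :=
  match address with
  | [] => 0
  | self_id :: _ =>
    (PySem.List.enumerate (PySem.List.slice address (some 1) none) 1).foldl
      (fun level p => if p.2 = self_id then p.1 else level) 0

-- ===== PORT B =====
-- for idx in range(len(address)-1, 0, -1): if address[idx] == address[0]: return idx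
def infer_level_alt_loop (address : List Int) (self_id : Int) : List Int → Int
  | [] => 0
  | idx :: rest =>
    if PySem.List.pyGetD address idx 0 = self_id then idx
    else infer_level_alt_loop address self_id rest

def infer_level_alt (address : List Int) : Int :=
  match address with
  | [] => 0
  | self_id :: _ =>
    infer_level_alt_loop address self_id
      (PySem.List.pyRange ((address.length : Int) - 1) 0 (-1))

-- ===== PRECONDITION & SPEC =====
def Spec_infer_level (address : List Int) (out : Int) : Prop := out = infer_level_alt address
instance (address : List Int) (out : Int) : Decidable (Spec_infer_level address out) := by unfold Spec_infer_level; infer_instance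

-- ===== CLAIM (what is proved, stated in full; the proofs are below) =====
def Claim_equal_infer_level : Prop := ∀ (address : List Int), Dom_infer_level address → Spec_infer_level address (infer_level address)

-- ===== LEMMAS AND PROOFS =====

-- first match scanning a pair list front-to-back, else acc (proof helper)
def rfScan (a : Int) : List (Int × Int) → Int → Int
  | [], acc => acc
  | p :: ps, acc => if p.2 = a then p.1 else rfScan a ps acc

theorem rfScan_append_singleton (a : Int) (qs : List (Int × Int)) (p : Int × Int) (acc : Int) :
    rfScan a (qs ++ [p]) acc = rfScan a qs (if p.2 = a then p.1 else acc) := by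
  induction qs generalizing acc with
  | nil => simp [rfScan]
  | cons q qs ih => by_cases h : q.2 = a <;> simp [rfScan, h, ih]

theorem foldl_eq_rfScan (a : Int) (ps : List (Int × Int)) (acc : Int) :
    ps.foldl (fun level p => if p.2 = a then p.1 else level) acc = rfScan a ps.reverse acc := by
  induction ps generalizing acc with
  | nil => simp [rfScan]
  | cons p ps ih => simp [List.foldl_cons, ih, rfScan_append_singleton]

theorem alt_loop_congr (l1 l2 : List Int) (a : Int) (idxs : List Int)
    (h : ∀ i ∈ idxs, PySem.List.pyGetD l1 i 0 = PySem.List.pyGetD l2 i 0) :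
    infer_level_alt_loop l1 a idxs = infer_level_alt_loop l2 a idxs := by
  induction idxs with
  | nil => rfl
  | cons i rest ih =>
    simp only [infer_level_alt_loop, h i (by simp)]
    rw [ih (fun j hj => h j (by simp [hj]))]

theorem main_eq (a : Int) (xs : List Int) :
    rfScan a (PySem.List.enumerate xs 1).reverse 0 =
      infer_level_alt_loop (a :: xs) a (PySem.List.pyRange (xs.length : Int) 0 (-1)) := by
  induction xs using List.reverseRecOn with
  | nil => simp [PySem.List.enumerate, rfScan, PySem.List.pyRange_neg_one_eq_nil, infer_level_alt_loop]
  | append_singleton ys y ih =>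
    have hcons : PySem.List.pyRange (((ys ++ [y]).length : Int)) 0 (-1) =
        ((ys ++ [y]).length : Int) :: PySem.List.pyRange (((ys ++ [y]).length : Int) - 1) 0 (-1) := by
      apply PySem.List.pyRange_neg_one_cons
      simp
    have hget : PySem.List.pyGetD (a :: (ys ++ [y])) ((ys ++ [y]).length : Int) 0 = y := by
      rw [PySem.List.pyGetD_eq_getElem _ _ (by positivity) (by simp)]
      simp [List.getElem_cons]
    rw [hcons, PySem.List.enumerate_append]
    simp only [List.reverse_append, PySem.List.enumerate_cons, PySem.List.enumerate_nil,
      List.reverse_cons, List.reverse_nil, List.nil_append, List.cons_append,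
      infer_level_alt_loop, hget, rfScan]
    by_cases hy : y = a
    · simp [hy]
      omega
    · simp only [hy, if_false]
      have hrange : PySem.List.pyRange (((ys ++ [y]).length : Int) - 1) 0 (-1) =
          PySem.List.pyRange ((ys.length : Int)) 0 (-1) := by
        have : ((ys ++ [y]).length : Int) - 1 = (ys.length : Int) := by simp
        rw [this]
      rw [hrange, ih]
      apply alt_loop_congr
      intro i hi
      rw [PySem.List.mem_pyRange_neg_one] at hi
      rw [PySem.List.pyGetD_eq_getElem _ _ (by omega) (by simp; omega),
          PySem.List.pyGetD_eq_getElem _ _ (by omega) (by simp; omega)]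
      have hlt : i.toNat - 1 < ys.length := by omega
      simp only [List.getElem_cons]
      split
      · rfl
      · rw [List.getElem_append_left]

-- ===== VERDICT (by name: the statement is the Claim_ definition above) =====
theorem infer_level_spec : Claim_equal_infer_level := by
  intro address _
  unfold Spec_infer_level infer_level infer_level_alt
  match address with
  | [] => rfl
  | a :: xs =>
    simp only
    rw [foldl_eq_rfScan, PySem.List.slice_from_one]
    have : ((List.length (a :: xs) : Int) - 1) = (xs.length : Int) := by simp
    rw [this]
    exact main_eq a xs
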